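-- pv_equiv track=rewrite | github.com/mrxy56/CodeSignal | 8. matrixElementsSum.py | solution
-- ===== SOURCE A (Python) =====
-- def solution(matrix):
--     n = len(matrix)
--     m = len(matrix[0])
--     for i in range(1, n):
--         for j in range(m):
--             if matrix[i - 1][j] == 0:
--                 matrix[i][j] = 0
--     ans = 0
--     for i in range(n):
--         for j in range(m):
--             ans += matrix[i][j]
--     return ans
-- ===== SOURCE B (Python) =====
-- def solution(matrix):
--     # Column-major single fused pass: for each column, add entries top-down
--     # until the first zero, which blocks everything below it.
--     # Note: unlike A, this does not mutate `matrix`; the equivalence claimed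
--     # is about the return value only.
--     total = 0
--     for j in range(len(matrix[0])):
--         for row in matrix:
--             if row[j] == 0:
--                 break
--             total += row[j]
--     return total
-- ===== Notes on version B (the rewrite author's own statement) =====
-- stated objective: alternative
-- what changed: Replaces A's two full row-major passes (zero-propagation with in-place mutation, then summation) by a single column-major pass that sums each column top-down and stops at the first zero; B does not mutate the matrix (return-value equivalence).
import Mathlib
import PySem

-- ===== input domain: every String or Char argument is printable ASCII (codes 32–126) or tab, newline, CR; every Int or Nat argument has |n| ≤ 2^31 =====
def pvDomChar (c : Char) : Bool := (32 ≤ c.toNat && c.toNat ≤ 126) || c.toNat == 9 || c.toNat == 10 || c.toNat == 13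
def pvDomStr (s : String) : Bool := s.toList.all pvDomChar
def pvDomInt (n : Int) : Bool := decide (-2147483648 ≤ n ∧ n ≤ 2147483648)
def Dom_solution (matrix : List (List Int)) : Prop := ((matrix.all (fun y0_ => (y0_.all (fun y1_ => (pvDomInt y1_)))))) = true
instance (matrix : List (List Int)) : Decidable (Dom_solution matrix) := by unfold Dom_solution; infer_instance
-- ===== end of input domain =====

-- B replaces A's two row-major passes (in-place zero propagation, then summation)
-- by one column-major pass summing each column until its first zero.
-- A mutates its argument in place (zeroes below zeros); B does not: the
-- equivalence proved here is about the RETURN value only.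

-- ===== PORT A =====
-- Indexing uses getD; under Pre_solution every index A touches is in range,
-- so getD agrees with Python's (raising) indexing there.
def solution (matrix : List (List Int)) : Int :=
  let n := matrix.length
  let m := (matrix.headD []).length
  let M := (List.range' 1 (n - 1)).foldl
    (fun M i => (List.range m).foldl
      (fun M j => if (M.getD (i - 1) []).getD j 0 = 0
                  then M.set i ((M.getD i []).set j 0) else M) M) matrix
  (List.range n).foldl
    (fun ans i => (List.range m).foldl
      (fun ans j => ans + (M.getD i []).getD j 0) ans) 0

-- ===== PORT B =====
-- 'for row in matrix: if row[j]==0: break; total += row[j]'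
def colLoop (rows : List (List Int)) (j : Nat) (total : Int) : Int :=
  match rows with
  | [] => total
  | r :: rest => if r.getD j 0 = 0 then total else colLoop rest j (total + r.getD j 0)

def solution_alt (matrix : List (List Int)) : Int :=
  let m := (matrix.headD []).length
  (List.range m).foldl (fun total j => colLoop matrix j total) 0

-- ===== PRECONDITION & SPEC =====
-- Python A raises IndexError on an empty matrix (matrix[0]) and on a ragged
-- matrix whose later row is shorter than row 0; Pre_ excludes exactly those.
def Pre_solution (matrix : List (List Int)) : Prop :=
  matrix ≠ [] ∧ ∀ r ∈ matrix, (matrix.headD []).length ≤ r.length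
instance (matrix : List (List Int)) : Decidable (Pre_solution matrix) := by
  unfold Pre_solution; infer_instance
def pvWitness_solution : List (List Int) := [[1, 2], [0, 3]]

def Spec_solution (matrix : List (List Int)) (out : Int) : Prop := out = solution_alt matrix
instance (matrix : List (List Int)) (out : Int) : Decidable (Spec_solution matrix out) := by unfold Spec_solution; infer_instance

-- ===== CLAIM (what is proved, stated in full; the proofs are below) =====
def Claim_equal_solution : Prop := ∀ (matrix : List (List Int)), Dom_solution matrix → Pre_solution matrix → Spec_solution matrix (solution matrix)

-- ===== LEMMAS AND PROOFS =====

-- row i after the inner j-loop: entry j zeroed where the (final) row above is zero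
def maskRow (prev cur : List Int) (m : Nat) : List Int :=
  (List.range m).foldl (fun c j => if prev.getD j 0 = 0 then c.set j 0 else c) cur

-- the matrix rows after A's propagation loop, given the final row above
def propRows (m : Nat) : List Int → List (List Int) → List (List Int)
  | _, [] => []
  | prev, r :: rs => maskRow prev r m :: propRows m (maskRow prev r m) rs

-- column values after propagation, given the previous final value
def gprop : Int → List Int → List Int
  | _, [] => []
  | prev, x :: xs => (if prev = 0 then 0 else x) :: gprop (if prev = 0 then 0 else x) xs

-- sum of a column until (excluding) its first zero
def colS : List Int → Int
  | [] => 0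
  | x :: xs => if x = 0 then 0 else x + colS xs

theorem maskRow_getD_ge (prev cur : List Int) (m j : Nat) (hj : m ≤ j) :
    (maskRow prev cur m).getD j 0 = cur.getD j 0 := by
  induction m with
  | zero => rfl
  | succ m ih =>
    simp only [maskRow, List.range_succ, List.foldl_append, List.foldl_cons, List.foldl_nil]
    split
    · rw [show (List.foldl (fun c j => if prev.getD j 0 = 0 then c.set j 0 else c) cur (List.range m)) = maskRow prev cur m from rfl]
      rw [List.getD, List.getElem?_set_ne (by omega)]
      exact ih (by omega)
    · exact ih (by omega)

theorem maskRow_getD (prev cur : List Int) (m j : Nat) (hj : j < m) :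
    (maskRow prev cur m).getD j 0 = if prev.getD j 0 = 0 then 0 else cur.getD j 0 := by
  induction m with
  | zero => omega
  | succ m ih =>
    simp only [maskRow, List.range_succ, List.foldl_append, List.foldl_cons, List.foldl_nil]
    rw [show (List.foldl (fun c j => if prev.getD j 0 = 0 then c.set j 0 else c) cur (List.range m)) = maskRow prev cur m from rfl]
    rcases Nat.lt_or_ge j m with h | h
    · split
      · rw [List.getD, List.getElem?_set_ne (by omega)]
        exact ih h
      · exact ih h
    · have hjm : j = m := by omega
      subst hjm
      by_cases hz : prev.getD j 0 = 0
      all_goals simp only [List.getD] at hz ⊢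
      · rw [if_pos hz, if_pos hz]
        rcases Nat.lt_or_ge j (maskRow prev cur j).length with hlen | hlen
        · rw [List.getElem?_set_self hlen]; rfl
        · rw [List.getElem?_set]
          have h2 : (maskRow prev cur j)[j]? = none := List.getElem?_eq_none hlen
          simp [Nat.not_lt.mpr hlen]
      · rw [if_neg hz, if_neg hz]
        exact maskRow_getD_ge prev cur j j h

theorem inner_fold (m : Nat) (M : List (List Int)) (i : Nat) (hi : 1 ≤ i) :
    (List.range m).foldl
      (fun M j => if (M.getD (i - 1) []).getD j 0 = 0 then M.set i ((M.getD i []).set j 0) else M) M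
    = M.set i (maskRow (M.getD (i - 1) []) (M.getD i []) m) := by
  rcases Nat.lt_or_ge i M.length with hlt | hge
  · induction m with
    | zero =>
      simp only [List.range_zero, List.foldl_nil, maskRow, List.foldl_nil]
      rw [List.getD_eq_getElem _ _ hlt, List.set_getElem_self hlt]
    | succ m ih =>
      simp only [List.range_succ, List.foldl_append, List.foldl_cons, List.foldl_nil] at ih ⊢
      rw [ih]
      have h1 : (M.set i (maskRow (M.getD (i - 1) []) (M.getD i []) m)).getD (i - 1) []
          = M.getD (i - 1) [] := by
        rw [List.getD, List.getElem?_set_ne (by omega)]; rfl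
      have h2 : (M.set i (maskRow (M.getD (i - 1) []) (M.getD i []) m)).getD i []
          = maskRow (M.getD (i - 1) []) (M.getD i []) m := by
        rw [List.getD_eq_getElem _ _ (by simpa using hlt)]
        simp
      rw [h1, h2]
      by_cases hz : (M.getD (i - 1) []).getD m 0 = 0
      · rw [if_pos hz, List.set_set]
        congr 1
        simp only [maskRow, List.range_succ, List.foldl_append, List.foldl_cons, List.foldl_nil]
        rw [if_pos hz]
      · rw [if_neg hz]
        congr 1
        simp only [maskRow, List.range_succ, List.foldl_append, List.foldl_cons, List.foldl_nil]
        rw [if_neg hz]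
  · have hid : ∀ x, M.set i x = M := fun x => List.set_eq_of_length_le hge
    rw [hid]
    induction m with
    | zero => rfl
    | succ m ih =>
      simp only [List.range_succ, List.foldl_append, List.foldl_cons, List.foldl_nil] at ih ⊢
      rw [ih]
      split
      · exact hid _
      · rfl

theorem outer_fold (m : Nat) (rest : List (List Int)) : ∀ (pre : List (List Int)) (prev : List Int),
    1 ≤ pre.length → (pre ++ rest).getD (pre.length - 1) [] = prev →
    (List.range' pre.length rest.length).foldl
      (fun M i => M.set i (maskRow (M.getD (i - 1) []) (M.getD i []) m)) (pre ++ rest)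
    = pre ++ propRows m prev rest := by
  induction rest with
  | nil => intro pre prev _ _; simp [propRows]
  | cons r rs ih =>
    intro pre prev hlen hprev
    simp only [List.length_cons]
    rw [List.range'_succ, List.foldl_cons]
    have e1 : (pre ++ r :: rs).getD pre.length [] = r := by
      rw [List.getD_append_right] <;> simp
    have e2 : (pre ++ r :: rs).set pre.length (maskRow prev r m)
        = (pre ++ [maskRow prev r m]) ++ rs := by
      rw [List.set_append_right] <;> simp
    rw [e1, hprev, e2]
    have h3 : ((pre ++ [maskRow prev r m]) ++ rs).getD ((pre ++ [maskRow prev r m]).length - 1) []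
        = maskRow prev r m := by
      have : (pre ++ [maskRow prev r m]).length - 1 = pre.length := by simp
      rw [this, List.getD, List.getElem?_append_left (by simp), List.getElem?_append_right (le_refl _)]
      simp
    have := ih (pre ++ [maskRow prev r m]) (maskRow prev r m) (by simp) h3
    simp only [List.length_append, List.length_cons, List.length_nil] at this ⊢
    rw [show pre.length + (0 + 1) = pre.length + 1 from by omega] at this
    rw [this]
    simp [propRows]

theorem propRows_length (m : Nat) (rs : List (List Int)) : ∀ prev, (propRows m prev rs).length = rs.length := by
  induction rs with
  | nil => intro _; rfl
  | cons r rs ih => intro prev; simp [propRows, ih]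

theorem sum_map_range (f : Nat → Int) (k : Nat) :
    ((List.range k).map f).sum = ∑ i ∈ Finset.range k, f i := by
  induction k with
  | zero => rfl
  | succ k ih => simp [List.range_succ, Finset.sum_range_succ, ih]

theorem sum_getD (l : List (List Int)) (f : List Int → Int) :
    ∑ i ∈ Finset.range l.length, f (l.getD i []) = (l.map f).sum := by
  induction l with
  | nil => rfl
  | cons a l ih =>
    rw [List.length_cons, Finset.sum_range_succ']
    simp only [List.getD_cons_succ, List.getD_cons_zero, ih, List.map_cons, List.sum_cons]
    ring

theorem col_prop (m j : Nat) (hj : j < m) (rs : List (List Int)) : ∀ (prev : List Int),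
    (propRows m prev rs).map (fun r => r.getD j 0)
    = gprop (prev.getD j 0) (rs.map (fun r => r.getD j 0)) := by
  induction rs with
  | nil => intro _; rfl
  | cons r rs ih =>
    intro prev
    simp only [propRows, List.map_cons, gprop, ih, maskRow_getD _ _ _ _ hj]

theorem sum_gprop (xs : List Int) : ∀ (prev : Int),
    (gprop prev xs).sum = if prev = 0 then 0 else colS xs := by
  induction xs with
  | nil => intro prev; simp [gprop, colS]
  | cons x xs ih =>
    intro prev
    simp only [gprop, List.sum_cons, ih]
    by_cases hp : prev = 0
    · simp [hp]
    · simp only [if_neg hp, colS]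
      by_cases hx : x = 0 <;> simp [hx]

theorem colLoop_eq (rows : List (List Int)) (j : Nat) : ∀ (t : Int),
    colLoop rows j t = t + colS (rows.map (fun r => r.getD j 0)) := by
  induction rows with
  | nil => intro t; simp [colLoop, colS]
  | cons r rs ih =>
    intro t
    simp only [colLoop, List.map_cons, colS, ih]
    split_ifs <;> ring

theorem solution_spec : Claim_equal_solution := by
  intro matrix _ hpre
  show solution matrix = solution_alt matrix
  obtain ⟨hne, -⟩ := hpre
  cases matrix with
  | nil => exact absurd rfl hne
  | cons r0 rs =>
    unfold solution solution_alt
    simp only [List.headD_cons, List.length_cons, Nat.add_sub_cancel]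
    -- propagation phase: rewrite the inner j-loop (inner_fold), then the outer i-loop (outer_fold)
    have hprop : (List.range' 1 rs.length).foldl
        (fun M i => (List.range r0.length).foldl
          (fun M j => if (M.getD (i - 1) []).getD j 0 = 0 then M.set i ((M.getD i []).set j 0) else M) M)
        (r0 :: rs) = r0 :: propRows r0.length r0 rs := by
      have step1 := PySem.List.foldl_congr_mem
        (l := List.range' 1 rs.length) (init := (r0 :: rs : List (List Int)))
        (f := fun M i => (List.range r0.length).foldl
          (fun M j => if (M.getD (i - 1) []).getD j 0 = 0 then M.set i ((M.getD i []).set j 0) else M) M)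
        (g := fun M i => M.set i (maskRow (M.getD (i - 1) []) (M.getD i []) r0.length))
        (fun M i hi => inner_fold r0.length M i (by
          have := List.mem_range'_1.mp hi; omega))
      rw [step1]
      have step2 := outer_fold r0.length rs [r0] r0 (by simp) rfl
      simp only [List.singleton_append, List.length_cons, List.length_nil, Nat.zero_add] at step2
      exact step2
    rw [hprop]
    -- summation phase: both double loops become Finset sums
    simp only [colLoop_eq, PySem.List.foldl_add, sum_map_range, zero_add]
    rw [Finset.sum_comm]
    refine Finset.sum_congr rfl fun j hj => ?_
    have hj' : j < r0.length := Finset.mem_range.mp hj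
    have hn : rs.length + 1 = (r0 :: propRows r0.length r0 rs : List (List Int)).length := by
      simp [propRows_length]
    rw [hn, sum_getD _ (fun r => r.getD j 0), List.map_cons, List.sum_cons,
        col_prop _ _ hj', sum_gprop, List.map_cons]
    simp only [colS]
    split_ifs with h0
    · simpa using h0
    · rfl
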